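-- pv_equiv track=rewrite | github.com/rakesh-suru/leetcode_solutions | 1829-Maximum-XOR-for-Each-Query/sol3.py | getMaximumXor
-- ===== SOURCE A (Python) =====
-- from typing import List
--
-- def getMaximumXor(nums: List[int], maximumBit: int) -> List[int]:
--     max_xor = (1 << maximumBit) - 1
--     ans = []
--     for i in range(len(nums)-1, -1, -1):
--         xor_sum = 0
--         for j in range(i+1):
--             xor_sum ^= nums[j]
--         ans.append(xor_sum ^ max_xor)
--     return ans
-- ===== SOURCE B (Python) =====
-- from typing import List
--
-- def getMaximumXor(nums: List[int], maximumBit: int) -> List[int]: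
--     # One pass: maintain the running prefix XOR, then reverse at the end.
--     mask = (1 << maximumBit) - 1
--     ans = []
--     acc = 0
--     for x in nums:
--         acc ^= x
--         ans.append(acc ^ mask)
--     ans.reverse()
--     return ans
-- ===== Notes on version B (the rewrite author's own statement) =====
-- stated objective: faster
-- what changed: Replaces the quadratic recomputation of each prefix XOR from scratch with a single pass maintaining a running prefix XOR, reversing the answer list once at the end.
import Mathlib
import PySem

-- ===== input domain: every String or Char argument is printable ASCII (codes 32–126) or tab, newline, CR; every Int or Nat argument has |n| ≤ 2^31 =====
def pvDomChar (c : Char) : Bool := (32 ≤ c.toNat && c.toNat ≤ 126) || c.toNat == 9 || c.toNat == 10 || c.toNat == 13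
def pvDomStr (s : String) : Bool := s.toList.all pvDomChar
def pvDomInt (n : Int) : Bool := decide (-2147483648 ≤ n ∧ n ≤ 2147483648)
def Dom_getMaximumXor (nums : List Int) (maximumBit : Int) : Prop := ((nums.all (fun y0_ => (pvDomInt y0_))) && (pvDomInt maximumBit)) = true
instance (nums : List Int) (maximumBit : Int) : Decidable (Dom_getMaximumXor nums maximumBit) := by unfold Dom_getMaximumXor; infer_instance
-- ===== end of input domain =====

-- B replaces A's quadratic per-prefix XOR recomputation with one pass keeping a running prefix XOR (measured asymptotically faster).


-- ===== PORT A =====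
-- '(1 << maximumBit)' is exact under Pre_ (0 ≤ maximumBit); 'pyGetD nums j 0' is used where j is always in range.
def getMaximumXor (nums : List Int) (maximumBit : Int) : List Int :=
  let maxXor : Int := ((1 : Int) <<< maximumBit.toNat) - 1
  (PySem.List.pyRange ((nums.length : Int) - 1) (-1) (-1)).foldl (fun ans i =>
    let xorSum : Int := (PySem.List.pyRange 0 (i + 1) 1).foldl
      (fun s j => PySem.Int.bxor s (PySem.List.pyGetD nums j 0)) 0
    ans ++ [PySem.Int.bxor xorSum maxXor]) []

-- ===== PORT B =====
def getMaximumXor_alt (nums : List Int) (maximumBit : Int) : List Int :=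
  let mask : Int := ((1 : Int) <<< maximumBit.toNat) - 1
  (nums.foldl (fun (p : List Int × Int) x =>
      let acc := PySem.Int.bxor p.2 x
      (p.1 ++ [PySem.Int.bxor acc mask], acc)) ([], 0)).1.reverse

-- ===== PRECONDITION & SPEC =====
-- Pre_ excludes only maximumBit < 0, where Python A raises ValueError on '1 << maximumBit'.
def Pre_getMaximumXor (nums : List Int) (maximumBit : Int) : Prop := 0 ≤ maximumBit
instance (nums : List Int) (maximumBit : Int) : Decidable (Pre_getMaximumXor nums maximumBit) := by unfold Pre_getMaximumXor; infer_instance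
def pvWitness_getMaximumXor : List Int × Int := ([3, 1, 2], 3)

def Spec_getMaximumXor (nums : List Int) (maximumBit : Int) (out : List Int) : Prop := out = getMaximumXor_alt nums maximumBit
instance (nums : List Int) (maximumBit : Int) (out : List Int) : Decidable (Spec_getMaximumXor nums maximumBit out) := by unfold Spec_getMaximumXor; infer_instance

-- ===== CLAIM (what is proved, stated in full; the proofs are below) =====
def Claim_equal_getMaximumXor : Prop := ∀ (nums : List Int) (maximumBit : Int), Dom_getMaximumXor nums maximumBit → Pre_getMaximumXor nums maximumBit → Spec_getMaximumXor nums maximumBit (getMaximumXor nums maximumBit)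

-- ===== LEMMAS AND PROOFS =====

-- appending folds are maps
theorem pv_foldl_append_map {α β : Type} (l : List α) (f : α → β) (init : List β) :
    l.foldl (fun ans i => ans ++ [f i]) init = init ++ l.map f := by
  induction l generalizing init with
  | nil => simp
  | cons x xs ih => simp [List.foldl, ih]

-- A's inner loop over range(i+1) is the fold of XOR over the first k elements
theorem pv_inner (nums : List Int) (k : Nat) (hk : k ≤ nums.length) :
    (PySem.List.pyRange 0 (k : Int) 1).foldl
      (fun s j => PySem.Int.bxor s (PySem.List.pyGetD nums j 0)) 0
      = (nums.take k).foldl PySem.Int.bxor 0 := by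
  induction k with
  | zero => simp [PySem.List.pyRange_one_eq_nil]
  | succ n ih =>
    have hn : n < nums.length := hk
    have hsplit : PySem.List.pyRange 0 ((n : Int) + 1) 1
        = PySem.List.pyRange 0 (n : Int) 1 ++ [(n : Int)] :=
      PySem.List.pyRange_one_succ_right (by positivity)
    push_cast
    rw [hsplit, List.foldl_append, ih (Nat.le_of_lt hn)]
    rw [List.take_add_one, List.foldl_append, List.getElem?_eq_getElem hn]
    simp only [List.foldl_cons, List.foldl_nil, Option.toList_some]
    rw [PySem.List.pyGetD_natCast, List.getD_eq_getElem?_getD, List.getElem?_eq_getElem hn]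
    rfl

-- the common spec both ports reduce to
def pvSpecList (nums : List Int) (mask : Int) : List Int :=
  (List.range nums.length).map
    (fun k => PySem.Int.bxor ((nums.take (k + 1)).foldl PySem.Int.bxor 0) mask)

theorem pv_A_eq (nums : List Int) (mask : Int) :
    (PySem.List.pyRange ((nums.length : Int) - 1) (-1) (-1)).foldl (fun ans i =>
      ans ++ [PySem.Int.bxor ((PySem.List.pyRange 0 (i + 1) 1).foldl
        (fun s j => PySem.Int.bxor s (PySem.List.pyGetD nums j 0)) 0) mask]) []
    = (pvSpecList nums mask).reverse := by
  rw [pv_foldl_append_map]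
  have hrev : PySem.List.pyRange ((nums.length : Int) - 1) (-1) (-1)
      = (PySem.List.pyRange 0 (nums.length : Int) 1).reverse := by
    have := PySem.List.pyRange_neg_one_eq_reverse ((nums.length : Int) - 1) (-1)
    simpa using this
  rw [hrev, List.map_reverse, List.nil_append]
  congr 1
  rw [PySem.List.pyRange_one, List.map_map]
  unfold pvSpecList
  apply List.map_congr_left
  intro k hk
  simp only [List.mem_range] at hk
  simp only [Function.comp]
  congr 1
  have : ((0 : Int) + (k : Int)) + 1 = ((k + 1 : Nat) : Int) := by push_cast; ring
  rw [this, pv_inner nums (k + 1) hk]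

-- invariant of B's single pass
theorem pv_B_inv (l : List Int) : ∀ (ans : List Int) (acc : Int) (mask : Int),
    (l.foldl (fun (p : List Int × Int) x =>
        (p.1 ++ [PySem.Int.bxor (PySem.Int.bxor p.2 x) mask], PySem.Int.bxor p.2 x))
        (ans, acc)).1
    = ans ++ (List.range l.length).map
        (fun k => PySem.Int.bxor ((l.take (k + 1)).foldl PySem.Int.bxor acc) mask) := by
  induction l with
  | nil => simp
  | cons x xs ih =>
    intro ans acc mask
    rw [List.foldl_cons, ih, List.length_cons, List.range_succ_eq_map,
      List.map_cons, List.map_map, List.append_assoc, List.singleton_append]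
    congr 1

theorem pv_B_eq (nums : List Int) (mask : Int) :
    (nums.foldl (fun (p : List Int × Int) x =>
        (p.1 ++ [PySem.Int.bxor (PySem.Int.bxor p.2 x) mask], PySem.Int.bxor p.2 x))
        ([], 0)).1 = pvSpecList nums mask := by
  rw [pv_B_inv]
  simp [pvSpecList]

-- ===== VERDICT (by name: the statement is the Claim_ definition above) =====
theorem getMaximumXor_spec : Claim_equal_getMaximumXor := by
  intro nums maximumBit _ _
  show getMaximumXor nums maximumBit = getMaximumXor_alt nums maximumBit
  unfold getMaximumXor getMaximumXor_alt
  dsimp only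
  rw [pv_A_eq, pv_B_eq]
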